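-- pv_equiv track=rewrite | github.com/ananazzz/Wrist-Prothesis- | signal_mean_builder.py | latency_point
-- ===== SOURCE A (Python) =====
-- def latency_point(signal_filt, l_on, l_off, calibr_max, calibr_min):
--     latenced_sig = []
--     clock = 0
--     allow_change=True
--     motor_state=0
--     for i in range(len(signal_filt)):
--         if(allow_change):
--             if(signal_filt[i]>calibr_min and signal_filt[i]<calibr_max):
--                 motor_state = 1
--             else:
--                 motor_state = 0
--             allow_change = False
--             clock=0
--         else:
--             clock+=1
--             if(motor_state==1 and clock>l_on):
--                 allow_change=True
--             if(motor_state==0 and clock>l_off):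
--                 allow_change = True
--         latenced_sig.append(motor_state)
--     return latenced_sig
-- ===== SOURCE B (Python) =====
-- def latency_point(signal_filt, l_on, l_off, calibr_max, calibr_min):
--     out = []
--     n = len(signal_filt)
--     i = 0
--     while i < n:
--         s = 1 if calibr_min < signal_filt[i] < calibr_max else 0
--         thr = l_on if s == 1 else l_off
--         block = max(1, thr + 1) + 1
--         out.extend([s] * min(block, n - i))
--         i += block
--     return out
-- ===== Notes on version B (the rewrite author's own statement) =====
-- stated objective: alternative
-- what changed: Replaces A's per-sample state machine (clock/allow_change flags updated at every sample) by a block-skipping while loop: at each decision index it computes the state once, emits it as a replicated run of length max(1, thr+1)+1 (clipped to the tail) and jumps directly to the next decision point.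
import Mathlib
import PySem

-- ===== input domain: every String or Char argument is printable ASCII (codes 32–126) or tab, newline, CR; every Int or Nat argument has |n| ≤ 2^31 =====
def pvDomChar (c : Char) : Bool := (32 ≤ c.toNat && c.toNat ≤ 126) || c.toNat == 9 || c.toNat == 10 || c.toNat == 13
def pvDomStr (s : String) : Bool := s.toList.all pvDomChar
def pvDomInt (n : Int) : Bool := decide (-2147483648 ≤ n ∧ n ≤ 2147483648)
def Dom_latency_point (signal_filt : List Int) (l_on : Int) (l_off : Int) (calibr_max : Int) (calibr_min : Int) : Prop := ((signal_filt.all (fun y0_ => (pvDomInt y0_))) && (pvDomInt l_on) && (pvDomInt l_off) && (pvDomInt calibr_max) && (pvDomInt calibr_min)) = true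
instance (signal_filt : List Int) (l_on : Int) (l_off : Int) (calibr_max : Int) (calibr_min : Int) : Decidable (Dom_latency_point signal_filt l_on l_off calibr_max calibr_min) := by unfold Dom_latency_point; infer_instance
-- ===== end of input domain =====

-- B replaces A's per-sample state machine by a block-skipping while loop that emits each
-- decided state as a replicated run and jumps straight to the next decision point (objective: alternative decomposition).

-- ===== PORT A =====
-- one iteration of A's for-loop; state = (latenced_sig, clock, allow_change, motor_state)
def aStep (l_on l_off calibr_max calibr_min : Int)
    (acc : List Int × Int × Bool × Int) (x : Int) : List Int × Int × Bool × Int :=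
  let sig := acc.1
  let clock := acc.2.1
  let allow := acc.2.2.1
  let ms := acc.2.2.2
  if allow then
    let ms' : Int := if x > calibr_min ∧ x < calibr_max then 1 else 0
    (sig ++ [ms'], 0, false, ms')
  else
    let clock' := clock + 1
    let allow1 := if ms = 1 ∧ clock' > l_on then true else allow
    let allow2 := if ms = 0 ∧ clock' > l_off then true else allow1
    (sig ++ [ms], clock', allow2, ms)

def latency_point (signal_filt : List Int) (l_on : Int) (l_off : Int) (calibr_max : Int) (calibr_min : Int) : List Int :=
  (signal_filt.foldl (aStep l_on l_off calibr_max calibr_min) ([], 0, true, 0)).1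

-- ===== PORT B =====
-- B's while-loop over index i, as recursion on the unprocessed suffix of the list
def bGo (l_on l_off calibr_max calibr_min : Int) : List Int → List Int
  | [] => []
  | x :: rest =>
    let s : Int := if calibr_min < x ∧ x < calibr_max then 1 else 0
    let thr : Int := if s = 1 then l_on else l_off
    let block : Nat := (max 1 (thr + 1)).toNat + 1
    List.replicate (min block (rest.length + 1)) s ++
      bGo l_on l_off calibr_max calibr_min (rest.drop (block - 1))
  termination_by l => l.length
  decreasing_by simp

def latency_point_alt (signal_filt : List Int) (l_on : Int) (l_off : Int) (calibr_max : Int) (calibr_min : Int) : List Int :=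
  bGo l_on l_off calibr_max calibr_min signal_filt

-- ===== PRECONDITION & SPEC =====
def Spec_latency_point (signal_filt : List Int) (l_on : Int) (l_off : Int) (calibr_max : Int) (calibr_min : Int) (out : List Int) : Prop := out = latency_point_alt signal_filt l_on l_off calibr_max calibr_min
instance (signal_filt : List Int) (l_on : Int) (l_off : Int) (calibr_max : Int) (calibr_min : Int) (out : List Int) : Decidable (Spec_latency_point signal_filt l_on l_off calibr_max calibr_min out) := by unfold Spec_latency_point; infer_instance

-- ===== CLAIM (what is proved, stated in full; the proofs are below) =====
def Claim_equal_latency_point : Prop := ∀ (signal_filt : List Int) (l_on : Int) (l_off : Int) (calibr_max : Int) (calibr_min : Int), Dom_latency_point signal_filt l_on l_off calibr_max calibr_min → Spec_latency_point signal_filt l_on l_off calibr_max calibr_min (latency_point signal_filt l_on l_off calibr_max calibr_min)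

-- ===== LEMMAS AND PROOFS =====

-- A's loop with the output list stripped out of the state
def aRun (l_on l_off calibr_max calibr_min : Int) : List Int → Int → Bool → Int → List Int
  | [], _, _, _ => []
  | x :: rest, _clock, true, _ms =>
    let s : Int := if x > calibr_min ∧ x < calibr_max then 1 else 0
    s :: aRun l_on l_off calibr_max calibr_min rest 0 false s
  | _x :: rest, clock, false, ms =>
    let clock' := clock + 1
    let allow1 := if ms = 1 ∧ clock' > l_on then true else false
    let allow2 := if ms = 0 ∧ clock' > l_off then true else allow1
    ms :: aRun l_on l_off calibr_max calibr_min rest clock' allow2 ms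

theorem foldl_aStep (l_on l_off cmax cmin : Int) (l : List Int) :
    ∀ (sig : List Int) (c : Int) (a : Bool) (m : Int),
    (l.foldl (aStep l_on l_off cmax cmin) (sig, c, a, m)).1
      = sig ++ aRun l_on l_off cmax cmin l c a m := by
  induction l with
  | nil => intro sig c a m; simp [aRun]
  | cons x rest ih =>
    intro sig c a m
    cases a with
    | true => simp [List.foldl, aStep, aRun, ih]
    | false => simp [List.foldl, aStep, aRun, ih]

-- in the allow_change state the clock and motor_state are irrelevant
theorem aRun_true (l_on l_off cmax cmin : Int) (l : List Int) (c c' m m' : Int) :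
    aRun l_on l_off cmax cmin l c true m = aRun l_on l_off cmax cmin l c' true m' := by
  cases l <;> simp [aRun]

-- holding phase: from (clock = c, allow = false, state = s) A emits s for
-- max 1 (thr - c + 1) samples and then is back at an allow_change decision
theorem aRun_hold (l_on l_off calibr_max calibr_min thr s : Int)
    (hall : ∀ c' : Int, (if s = 0 ∧ c' > l_off then true
        else if s = 1 ∧ c' > l_on then true else false) = decide (c' > thr)) :
    ∀ (l : List Int) (c : Int),
    aRun l_on l_off calibr_max calibr_min l c false s
      = List.replicate (min (max 1 (thr - c + 1)).toNat l.length) s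
        ++ aRun l_on l_off calibr_max calibr_min
            (l.drop (max 1 (thr - c + 1)).toNat) 0 true s := by
  intro l
  induction l with
  | nil => intro c; simp [aRun]
  | cons x rest ih =>
    intro c
    simp only [aRun]
    rw [hall (c + 1)]
    by_cases hc : c + 1 > thr
    · -- re-evaluation reached: exactly one more s, then allow_change
      have ht : (max 1 (thr - c + 1)).toNat = 1 := by omega
      rw [ht, decide_eq_true hc]
      simp [List.replicate_succ]
      exact aRun_true l_on l_off calibr_max calibr_min rest (c + 1) 0 s s
    · -- still holding
      have ht : (max 1 (thr - c + 1)).toNat = (max 1 (thr - (c + 1) + 1)).toNat + 1 := by omega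
      rw [decide_eq_false hc, ih (c + 1), ht, List.drop_succ_cons]
      have hmin : min ((max 1 (thr - (c + 1) + 1)).toNat + 1) (rest.length + 1)
          = min (max 1 (thr - (c + 1) + 1)).toNat rest.length + 1 := by omega
      rw [List.length_cons, hmin, List.replicate_succ]
      simp

-- main bridge: from an allow_change state A's loop computes exactly B's block recursion
theorem aRun_eq_bGo (l_on l_off cmax cmin : Int) (n : Nat) :
    ∀ (l : List Int), l.length ≤ n → ∀ (c m : Int),
    aRun l_on l_off cmax cmin l c true m = bGo l_on l_off cmax cmin l := by
  induction n with
  | zero =>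
    intro l hl c m
    have : l = [] := by cases l <;> simp_all
    subst this; simp [aRun, bGo]
  | succ n ih =>
    intro l hl c m
    cases l with
    | nil => simp [aRun, bGo]
    | cons x rest =>
      rw [bGo]
      set s : Int := if cmin < x ∧ x < cmax then 1 else 0 with hsdef
      have hs : s = 0 ∨ s = 1 := by
        by_cases h : cmin < x ∧ x < cmax <;> simp [hsdef, h]
      set thr : Int := if s = 1 then l_on else l_off with hthr
      have hall : ∀ c' : Int, (if s = 0 ∧ c' > l_off then true
          else if s = 1 ∧ c' > l_on then true else false) = decide (c' > thr) := by
        intro c'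
        rcases hs with h | h <;> rw [hthr] <;> simp [h]
      set t : Nat := (max 1 (thr + 1)).toNat with htdef
      have ht1 : 1 ≤ t := by omega
      have hstep : aRun l_on l_off cmax cmin (x :: rest) c true m
          = s :: aRun l_on l_off cmax cmin rest 0 false s := by
        simp [aRun, hsdef]
      rw [hstep, aRun_hold l_on l_off cmax cmin thr s hall rest 0]
      have htt : (max 1 (thr - 0 + 1)).toNat = t := by omega
      rw [htt, ih (rest.drop t) (by simp at hl ⊢; omega) 0 s]
      have hmin : min (t + 1) (rest.length + 1) = min t rest.length + 1 := by omega
      simp only [hmin, List.replicate_succ]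
      simp

theorem latency_point_eq (signal_filt : List Int) (l_on l_off cmax cmin : Int) :
    latency_point signal_filt l_on l_off cmax cmin
      = latency_point_alt signal_filt l_on l_off cmax cmin := by
  unfold latency_point latency_point_alt
  rw [foldl_aStep]
  simpa using aRun_eq_bGo l_on l_off cmax cmin signal_filt.length signal_filt le_rfl 0 0

-- ===== VERDICT (by name: the statement is the Claim_ definition above) =====
theorem latency_point_spec : Claim_equal_latency_point := by
  intro signal_filt l_on l_off cmax cmin _
  unfold Spec_latency_point
  exact latency_point_eq signal_filt l_on l_off cmax cmin
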